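-- pv_equiv track=rewrite | github.com/compsyguy/TekkenBot | CommandRecorder.py | process
-- ===== SOURCE A (Python) =====
-- def process(items):
--     if len(items) <= 1:
--         return items.copy()
--
--     result = []
--
--     for (previous_first, previous_second, previous_third), (first, second, third) in zip(items, items[1:]):
--         if first != previous_first or second > previous_second + 1:
--             result.append([previous_first, previous_second, previous_third])
--
--     result.append([first, second, third])
--     return result
--
--     """assert process([]) == []
--     assert process([('+1', 1)]) == [('+1', 1)]
--     assert process([('+1', 1), ('+1', 2)]) == [('+1', 2)]
--     assert process([
--         ('+1', 0), ('+1', 3),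
--         ('+2', 9), ('+2', 20), ('+2', 21), ('+2', 22), ('+2', 23)
--     ]) == [
--         ('+1', 0), ('+1', 3),
--         ('+2', 9), ('+2', 23)
--     ]"""
-- ===== SOURCE B (Python) =====
-- def process(items):
--     if len(items) <= 1:
--         return items.copy()
--
--     result = []
--     for first, second, third in items:
--         last = result[-1] if result else None
--         if last is not None and first == last[0] and second <= last[1] + 1:
--             result[-1] = [first, second, third]
--         else:
--             result.append([first, second, third])
--     return result
-- ===== Notes on version B (the rewrite author's own statement) =====
-- stated objective: simpler
-- what changed: B replaces A's zip-of-adjacent-pairs scan with trailing append by a single forward pass that overwrites the last result entry in place while a run continues, appending only at run breaks.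
import Mathlib
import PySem

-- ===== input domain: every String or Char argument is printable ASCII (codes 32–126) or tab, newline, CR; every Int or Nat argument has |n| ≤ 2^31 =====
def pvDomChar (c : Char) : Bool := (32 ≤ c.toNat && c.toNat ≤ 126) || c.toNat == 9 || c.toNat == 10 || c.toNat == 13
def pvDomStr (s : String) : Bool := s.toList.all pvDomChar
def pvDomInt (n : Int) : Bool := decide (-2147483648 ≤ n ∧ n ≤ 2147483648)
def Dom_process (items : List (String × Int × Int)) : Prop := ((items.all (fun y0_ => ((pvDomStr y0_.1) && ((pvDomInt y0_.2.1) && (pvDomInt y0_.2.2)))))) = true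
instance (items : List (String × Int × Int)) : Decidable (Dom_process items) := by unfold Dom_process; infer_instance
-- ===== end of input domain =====

-- B overwrites the tail of the result in a single forward pass instead of A's scan over
-- zipped adjacent pairs with a trailing append; same values, plainer decomposition.
-- Note: in Python, A and B both return fresh lists (no argument mutation); the
-- len<=1 branch's copy returns the original tuples, identical in value.

-- ===== PORT A =====
-- step of A's loop over zip(items, items[1:]): p.1 = (previous_first, previous_second,
-- previous_third), p.2 = (first, second, third)
def processStepA (acc : List (String × Int × Int))
    (p : (String × Int × Int) × (String × Int × Int)) : List (String × Int × Int) :=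
  if p.2.1 ≠ p.1.1 ∨ p.2.2.1 > p.1.2.1 + 1 then acc ++ [p.1] else acc

def process (items : List (String × Int × Int)) : List (String × Int × Int) :=
  if items.length ≤ 1 then items
  else
    match items with
    | [] => []  -- unreachable: length ≥ 2
    | x :: xs =>
      -- after the loop, (first, second, third) holds the last element of items
      (List.foldl processStepA [] (List.zip (x :: xs) xs)) ++ [xs.getLastD x]

-- ===== PORT B =====
-- step of B's loop: overwrite result[-1] while the run continues, else append
def processStepB (res : List (String × Int × Int)) (it : String × Int × Int) :
    List (String × Int × Int) :=
  match res.getLast? with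
  | some l => if it.1 = l.1 ∧ it.2.1 ≤ l.2.1 + 1 then res.dropLast ++ [it] else res ++ [it]
  | none => res ++ [it]

def process_alt (items : List (String × Int × Int)) : List (String × Int × Int) :=
  if items.length ≤ 1 then items
  else List.foldl processStepB [] items

-- ===== PRECONDITION & SPEC =====
def Spec_process (items : List (String × Int × Int)) (out : List (String × Int × Int)) : Prop := out = process_alt items
instance (items : List (String × Int × Int)) (out : List (String × Int × Int)) : Decidable (Spec_process items out) := by unfold Spec_process; infer_instance

-- ===== CLAIM (what is proved, stated in full; the proofs are below) =====
def Claim_equal_process : Prop := ∀ (items : List (String × Int × Int)), Dom_process items → Spec_process items (process items)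

-- ===== LEMMAS AND PROOFS =====

-- main invariant: B's fold carried on acc ++ [prev] equals A's fold over the zipped
-- pairs followed by the trailing append of the last element
theorem processB_fold_eq (rest : List (String × Int × Int)) :
    ∀ (prev : String × Int × Int) (acc : List (String × Int × Int)),
    List.foldl processStepB (acc ++ [prev]) rest
      = (List.foldl processStepA acc (List.zip (prev :: rest) rest)) ++ [rest.getLastD prev] := by
  induction rest with
  | nil => intro prev acc; simp
  | cons y rest' ih =>
    intro prev acc
    have hstep : processStepB (acc ++ [prev]) y
        = if y.1 ≠ prev.1 ∨ y.2.1 > prev.2.1 + 1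
          then (acc ++ [prev]) ++ [y] else acc ++ [y] := by
      simp only [processStepB, List.getLast?_concat, List.dropLast_concat]
      by_cases h1 : y.1 = prev.1 <;> by_cases h2 : y.2.1 ≤ prev.2.1 + 1 <;>
        simp [h1, h2]
    have hA : List.foldl processStepA acc (List.zip (prev :: y :: rest') (y :: rest'))
        = List.foldl processStepA (processStepA acc (prev, y)) (List.zip (y :: rest') rest') := by
      simp [List.zip]
    rw [List.foldl_cons, hstep, hA]
    by_cases hb : y.1 ≠ prev.1 ∨ y.2.1 > prev.2.1 + 1
    · rw [if_pos hb]
      have := ih y ((acc ++ [prev]))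
      rw [this]
      simp [processStepA, hb]
      simp [List.getLast?_cons]
    · rw [if_neg hb]
      have := ih y acc
      rw [this]
      simp [processStepA, hb]
      simp [List.getLast?_cons]

-- ===== VERDICT (by name: the statement is the Claim_ definition above) =====
theorem process_spec : Claim_equal_process := by
  intro items _
  unfold Spec_process process process_alt
  by_cases hlen : items.length ≤ 1
  · simp [hlen]
  · rw [if_neg hlen, if_neg hlen]
    match items with
    | [] => simp at hlen
    | x :: xs =>
      have : List.foldl processStepB [] (x :: xs)
          = List.foldl processStepB ([] ++ [x]) xs := by
        simp [List.foldl_cons, processStepB]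
      rw [this, processB_fold_eq xs x []]
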